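-- pv_equiv track=rewrite | github.com/zhanghaoran/deer-flow | scripts/deerflow-provider-config.py | remove_proxy_section
-- ===== SOURCE A (Python) =====
-- def remove_proxy_section(content: str) -> str:
--     """Remove proxy section from YAML content and replace with commented template."""
--     lines = content.split('\n')
--
--     # Find the uncommented proxy section
--     proxy_start = -1
--     proxy_end = -1
--     proxy_indent = 0
--
--     for i, line in enumerate(lines):
--         stripped = line.strip()
--         if stripped == 'proxy:':
--             proxy_start = i
--             proxy_indent = len(line) - len(line.lstrip())
--             # Find end of proxy section
--             for j in range(i + 1, len(lines)):
--                 next_line = lines[j]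
--                 next_stripped = next_line.strip()
--                 if not next_stripped:
--                     continue
--                 next_indent = len(next_line) - len(next_line.lstrip())
--                 if next_indent <= proxy_indent and not next_stripped.startswith('#'):
--                     proxy_end = j
--                     break
--             break
--
--     if proxy_start < 0:
--         # No uncommented proxy section found, return original
--         return content
--
--     # Check if there's already a header comment above the proxy section
--     header_start = proxy_start
--     for i in range(proxy_start - 1, -1, -1):
--         stripped = lines[i].strip()
--         if not stripped or stripped.startswith('#'):
--             header_start = i
--         else:
--             break
--
--     # Build result
--     result = []
--
--     # Add everything before the header/proxy section
--     result.extend(lines[:header_start])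
--
--     # Add commented proxy template
--     result.append('# =============================================================================')
--     result.append('# Proxy Configuration')
--     result.append('# =============================================================================')
--     result.append('# Configure HTTP proxy for web tools (web_search, web_fetch, image_search)')
--     result.append('#')
--     result.append('# proxy:')
--     result.append('#   # HTTP proxy URL')
--     result.append('#   http: http://proxy.example.com:8080')
--     result.append('#   # HTTPS proxy URL (often the same as http proxy)')
--     result.append('#   https: http://proxy.example.com:8080')
--     result.append('#   # Optional: Proxy authentication')
--     result.append('#   # username: your_username')
--     result.append('#   # password: your_password')
--     result.append('#   # Or use environment variables:')
--     result.append('#   # username: $PROXY_USERNAME')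
--     result.append('#   # password: $PROXY_PASSWORD')
--     result.append('')
--
--     # Add everything after the proxy section
--     if proxy_end >= 0:
--         result.extend(lines[proxy_end:])
--     else:
--         # proxy_end not found, add remaining lines
--         result.extend(lines[proxy_start + 1:])
--
--     return '\n'.join(result)
-- ===== SOURCE B (Python) =====
-- PROXY_TEMPLATE_LINES = (
--     '# =============================================================================',
--     '# Proxy Configuration',
--     '# =============================================================================',
--     '# Configure HTTP proxy for web tools (web_search, web_fetch, image_search)',
--     '#',
--     '# proxy:',
--     '#   # HTTP proxy URL',
--     '#   http: http://proxy.example.com:8080',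
--     '#   # HTTPS proxy URL (often the same as http proxy)',
--     '#   https: http://proxy.example.com:8080',
--     '#   # Optional: Proxy authentication',
--     '#   # username: your_username',
--     '#   # password: your_password',
--     '#   # Or use environment variables:',
--     '#   # username: $PROXY_USERNAME',
--     '#   # password: $PROXY_PASSWORD',
--     '',
-- )
--
--
-- def _is_blank_or_comment(line: str) -> bool:
--     s = line.strip()
--     return not s or s.startswith('#')
--
--
-- def remove_proxy_section(content: str) -> str:
--     """Remove proxy section from YAML content and replace with commented template."""
--     lines = content.split('\n')
--
--     # Single forward pass: header_candidate = index right after the last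
--     # non-blank, non-comment line seen so far.
--     found = None
--     header_candidate = 0
--     for i, line in enumerate(lines):
--         if line.strip() == 'proxy:':
--             indent = len(line) - len(line.lstrip())
--             found = (i, indent, header_candidate)
--             break
--         if not _is_blank_or_comment(line):
--             header_candidate = i + 1
--
--     if found is None:
--         return content
--
--     proxy_start, proxy_indent, header_start = found
--
--     # First line after the section: indent <= proxy_indent, not blank, not a comment.
--     proxy_end = next(
--         (proxy_start + 1 + k
--          for k, ln in enumerate(lines[proxy_start + 1:])
--          if ln.strip() and len(ln) - len(ln.lstrip()) <= proxy_indent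
--          and not ln.strip().startswith('#')),
--         None,
--     )
--
--     tail = lines[proxy_end:] if proxy_end is not None else lines[proxy_start + 1:]
--     return '\n'.join(lines[:header_start] + list(PROXY_TEMPLATE_LINES) + tail)
-- ===== Notes on version B (the rewrite author's own statement) =====
-- stated objective: alternative
-- what changed: The separate backward scan that finds the comment-header start above the proxy line is folded into the single forward pass (a running header-candidate index), the end-of-section search becomes a first-match search over the suffix, and the 17 in-function template appends become one module-level constant spliced in.
import Mathlib
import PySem

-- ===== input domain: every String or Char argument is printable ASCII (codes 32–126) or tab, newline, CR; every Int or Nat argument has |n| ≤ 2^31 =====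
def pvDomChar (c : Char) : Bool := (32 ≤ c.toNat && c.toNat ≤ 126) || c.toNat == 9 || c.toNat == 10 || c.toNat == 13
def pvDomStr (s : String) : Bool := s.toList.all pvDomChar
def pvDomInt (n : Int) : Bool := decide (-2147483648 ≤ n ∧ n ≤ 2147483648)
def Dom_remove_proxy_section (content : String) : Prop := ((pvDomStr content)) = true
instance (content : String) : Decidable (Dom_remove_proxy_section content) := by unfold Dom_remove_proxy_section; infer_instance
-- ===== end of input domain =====

-- B folds A's separate backward header scan into the single forward pass and finds the
-- section end as a first-match search over the suffix; the 17 in-function template appends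
-- become one module-level constant. Alternative decomposition, same cost.

-- ===== PORT A =====
-- helpers transliterating A's loops (lines are `List Char`; `content.split('\n')` = Chars.splitOn)
def pvIndentOf (l : List Char) : Nat := l.length - (PySem.Chars.lstrip l).length

-- outer `for i, line in enumerate(lines)` up to its `break`: first line whose strip is 'proxy:'
def pvFindProxyA : List (List Char) → Nat → Option (Nat × List Char)
  | [], _ => none
  | l :: ls, i =>
    if PySem.Chars.strip l = "proxy:".toList then some (i, l) else pvFindProxyA ls (i + 1)

-- inner `for j in range(i+1, len(lines))` finding proxy_end (none = proxy_end stays -1)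
def pvFindEndA (pIndent : Nat) : List (List Char) → Nat → Option Nat
  | [], _ => none
  | l :: ls, j =>
    if PySem.Chars.strip l = [] then pvFindEndA pIndent ls (j + 1)
    else if pvIndentOf l ≤ pIndent ∧ PySem.Chars.startswith (PySem.Chars.strip l) ['#'] = false
    then some j
    else pvFindEndA pIndent ls (j + 1)

-- backward `for i in range(proxy_start-1, -1, -1)` over the reversed prefix; cur = header_start
def pvHeaderA : List (List Char) → Nat → Nat
  | [], cur => cur
  | l :: ls, cur =>
    if ((PySem.Chars.strip l).isEmpty || PySem.Chars.startswith (PySem.Chars.strip l) ['#']) then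
      pvHeaderA ls (cur - 1)
    else cur

def pvTemplateA : List (List Char) :=
  ["# =============================================================================".toList,
   "# Proxy Configuration".toList,
   "# =============================================================================".toList,
   "# Configure HTTP proxy for web tools (web_search, web_fetch, image_search)".toList,
   "#".toList,
   "# proxy:".toList,
   "#   # HTTP proxy URL".toList,
   "#   http: http://proxy.example.com:8080".toList,
   "#   # HTTPS proxy URL (often the same as http proxy)".toList,
   "#   https: http://proxy.example.com:8080".toList,
   "#   # Optional: Proxy authentication".toList,
   "#   # username: your_username".toList,
   "#   # password: your_password".toList,
   "#   # Or use environment variables:".toList,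
   "#   # username: $PROXY_USERNAME".toList,
   "#   # password: $PROXY_PASSWORD".toList,
   "".toList]

def remove_proxy_section (content : String) : String :=
  let lines := PySem.Chars.splitOn content.toList ['\n']
  match pvFindProxyA lines 0 with
  | none => content
  | some (i, l) =>
    let pIndent := pvIndentOf l
    let pEnd := pvFindEndA pIndent (lines.drop (i + 1)) (i + 1)
    -- header_start ≤ i ≤ len lines, so Python's in-range slices are take/drop
    let hs := pvHeaderA ((lines.take i).reverse) i
    let tail := match pEnd with
      | some j => lines.drop j
      | none => lines.drop (i + 1)
    String.ofList (PySem.Chars.join ['\n'] (lines.take hs ++ pvTemplateA ++ tail))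

-- ===== PORT B =====
def pvBlankOrComment (l : List Char) : Bool :=
  (PySem.Chars.strip l).isEmpty || PySem.Chars.startswith (PySem.Chars.strip l) ['#']

-- single forward pass: hc = index right after the last non-blank, non-comment line seen
def pvScanB : List (List Char) → Nat → Nat → Option (Nat × Nat × Nat)
  | [], _, _ => none
  | l :: ls, i, hc =>
    if PySem.Chars.strip l = "proxy:".toList then some (i, pvIndentOf l, hc)
    else pvScanB ls (i + 1) (if pvBlankOrComment l then hc else i + 1)

def pvEndCondB (pIndent : Nat) (l : List Char) : Bool :=
  !(PySem.Chars.strip l).isEmpty && decide (pvIndentOf l ≤ pIndent) &&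
    !(PySem.Chars.startswith (PySem.Chars.strip l) ['#'])

-- module-level PROXY_TEMPLATE_LINES tuple
def pvTemplateB : List (List Char) :=
  ["# =============================================================================".toList,
   "# Proxy Configuration".toList,
   "# =============================================================================".toList,
   "# Configure HTTP proxy for web tools (web_search, web_fetch, image_search)".toList,
   "#".toList,
   "# proxy:".toList,
   "#   # HTTP proxy URL".toList,
   "#   http: http://proxy.example.com:8080".toList,
   "#   # HTTPS proxy URL (often the same as http proxy)".toList,
   "#   https: http://proxy.example.com:8080".toList,
   "#   # Optional: Proxy authentication".toList,
   "#   # username: your_username".toList,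
   "#   # password: your_password".toList,
   "#   # Or use environment variables:".toList,
   "#   # username: $PROXY_USERNAME".toList,
   "#   # password: $PROXY_PASSWORD".toList,
   "".toList]

def remove_proxy_section_alt (content : String) : String :=
  let lines := PySem.Chars.splitOn content.toList ['\n']
  match pvScanB lines 0 0 with
  | none => content
  | some (i, pIndent, hs) =>
    let pEnd := ((lines.drop (i + 1)).findIdx? (pvEndCondB pIndent)).map (fun k => i + 1 + k)
    let tail := match pEnd with
      | some j => lines.drop j
      | none => lines.drop (i + 1)
    String.ofList (PySem.Chars.join ['\n']
      (lines.take hs ++ pvTemplateB ++ tail))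


-- ===== PRECONDITION & SPEC =====
def Spec_remove_proxy_section (content : String) (out : String) : Prop := out = remove_proxy_section_alt content
instance (content : String) (out : String) : Decidable (Spec_remove_proxy_section content out) := by unfold Spec_remove_proxy_section; infer_instance

-- ===== CLAIM (what is proved, stated in full; the proofs are below) =====
def Claim_equal_remove_proxy_section : Prop := ∀ (content : String), Dom_remove_proxy_section content → Spec_remove_proxy_section content (remove_proxy_section content)

-- ===== LEMMAS AND PROOFS =====

-- B's first-match search over the suffix computes A's inner end-of-section loop
theorem pvFindEndA_eq (pIndent : Nat) :
    ∀ (ls : List (List Char)) (j : Nat),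
      pvFindEndA pIndent ls j = (ls.findIdx? (pvEndCondB pIndent)).map (fun k => j + k) := by
  intro ls
  induction ls with
  | nil => intro j; rfl
  | cons l ls ih =>
    intro j
    rw [pvFindEndA, List.findIdx?_cons]
    by_cases h1 : PySem.Chars.strip l = []
    · have hc : pvEndCondB pIndent l = false := by simp [pvEndCondB, h1]
      rw [if_pos h1, hc, if_neg Bool.false_ne_true, ih (j + 1), Option.map_map]
      congr 1
      funext k
      simp only [Function.comp_apply]
      omega
    · by_cases h2 : pvIndentOf l ≤ pIndent ∧ PySem.Chars.startswith (PySem.Chars.strip l) ['#'] = false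
      · have hc : pvEndCondB pIndent l = true := by
          simp [pvEndCondB, h1, h2.1, h2.2]
        rw [if_neg h1, if_pos h2, hc, if_pos rfl]
        simp
      · have hc : pvEndCondB pIndent l = false := by
          rcases not_and_or.mp h2 with h | h
          · simp [pvEndCondB, h]
          · have hsw : PySem.Chars.startswith (PySem.Chars.strip l) ['#'] = true := by
              cases hx : PySem.Chars.startswith (PySem.Chars.strip l) ['#'] with
              | false => exact absurd hx h
              | true => rfl
            simp [pvEndCondB, hsw]
        rw [if_neg h1, if_neg h2, hc, if_neg Bool.false_ne_true, ih (j + 1), Option.map_map]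
        congr 1
        funext k
        simp only [Function.comp_apply]
        omega

-- stepping A's backward header scan by one line
theorem pvHeaderA_cons (l : List Char) (dr : List (List Char)) (i : Nat) :
    pvHeaderA (l :: dr) (i + 1) = if pvBlankOrComment l then pvHeaderA dr i else i + 1 := by
  simp only [pvHeaderA, pvBlankOrComment, Nat.add_sub_cancel]
  rfl

theorem pvFindProxyA_le :
    ∀ (ls : List (List Char)) (i j : Nat) (l : List Char),
      pvFindProxyA ls i = some (j, l) → i ≤ j := by
  intro ls
  induction ls with
  | nil => intro i j l h; simp [pvFindProxyA] at h
  | cons x xs ih =>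
    intro i j l h
    rw [pvFindProxyA] at h
    split at h
    · simp at h; omega
    · have := ih (i + 1) j l h; omega

-- the single forward pass computes (proxy_start, proxy_indent, A's backward header scan)
theorem pvScanB_eq :
    ∀ (rest doneRev : List (List Char)) (i : Nat),
      pvScanB rest i (pvHeaderA doneRev i) =
        (pvFindProxyA rest i).map
          (fun p => (p.1, pvIndentOf p.2, pvHeaderA ((rest.take (p.1 - i)).reverse ++ doneRev) p.1)) := by
  intro rest
  induction rest with
  | nil => intro dr i; rfl
  | cons l ls ih =>
    intro dr i
    rw [pvScanB, pvFindProxyA]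
    by_cases h : PySem.Chars.strip l = "proxy:".toList
    · simp [h]
    · rw [if_neg h, if_neg h]
      have hstep : (if pvBlankOrComment l then pvHeaderA dr i else i + 1)
          = pvHeaderA (l :: dr) (i + 1) := (pvHeaderA_cons l dr i).symm
      rw [hstep, ih (l :: dr) (i + 1)]
      cases ho : pvFindProxyA ls (i + 1) with
      | none => rfl
      | some p =>
        obtain ⟨j, l'⟩ := p
        have hij : i + 1 ≤ j := pvFindProxyA_le ls (i + 1) j l' ho
        simp only [Option.map_some]
        have htake : (l :: ls).take (j - i) = l :: ls.take (j - (i + 1)) := by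
          have : j - i = (j - (i + 1)) + 1 := by omega
          rw [this, List.take_succ_cons]
        rw [htake]
        simp [List.reverse_cons, List.append_assoc]

-- the two template constants are the same list of lines
theorem pvTemplate_eq : pvTemplateB = pvTemplateA := rfl

-- ===== VERDICT (by name: the statement is the Claim_ definition above) =====
theorem remove_proxy_section_spec : Claim_equal_remove_proxy_section := by
  intro content _
  unfold Spec_remove_proxy_section remove_proxy_section remove_proxy_section_alt
  generalize PySem.Chars.splitOn content.toList ['\n'] = lines
  show
      (match pvFindProxyA lines 0 with
        | none => content
        | some (i, l) =>
          String.ofList (PySem.Chars.join ['\n']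
            (lines.take (pvHeaderA ((lines.take i).reverse) i) ++ pvTemplateA ++
              (match pvFindEndA (pvIndentOf l) (lines.drop (i + 1)) (i + 1) with
                | some j => lines.drop j
                | none => lines.drop (i + 1)))))
      =
      (match pvScanB lines 0 0 with
        | none => content
        | some (i, pIndent, hs) =>
          String.ofList (PySem.Chars.join ['\n']
            (lines.take hs ++ pvTemplateB ++
              (match ((lines.drop (i + 1)).findIdx? (pvEndCondB pIndent)).map (fun k => i + 1 + k) with
                | some j => lines.drop j
                | none => lines.drop (i + 1)))))
  have hscan : pvScanB lines 0 0 =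
      (pvFindProxyA lines 0).map
        (fun p => (p.1, pvIndentOf p.2, pvHeaderA ((lines.take p.1).reverse) p.1)) := by
    have h := pvScanB_eq lines [] 0
    simpa [pvHeaderA] using h
  rw [hscan]
  cases ho : pvFindProxyA lines 0 with
  | none => rfl
  | some p =>
    obtain ⟨i, l⟩ := p
    simp only [Option.map_some]
    rw [pvFindEndA_eq, pvTemplate_eq]
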